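-- pv_equiv track=rewrite | github.com/OPJMT/python_intro | les_7_errol/.venv/l7_vraag_4.py | get_excellent_students
-- ===== SOURCE A (Python) =====
-- def get_excellent_student(student):
--     uitmuntend_counter = 0
--     goed_counter = 0
--
--     for result in student["resultaten"].values():
--         if result == "onvoldoende":
--             continue
--         elif result == "uitmuntend":
--             uitmuntend_counter += 1
--             if uitmuntend_counter == 2:
--                 return student
--         elif result == "goed":
--             goed_counter += 1
--             if goed_counter == 4:
--                 return student
--         else:
--             continue
--
--     return None
--
-- def get_excellent_students(all_students):
--     exc_students = []
--     for student in all_students: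
--         exc_student = get_excellent_student(student)
--         if not exc_student is None:
--             exc_students.append(exc_student)
--         else:
--             continue
--     return exc_students
-- ===== SOURCE B (Python) =====
-- def get_excellent_student(student):
--     vals = list(student["resultaten"].values())
--     if vals.count("uitmuntend") >= 2 or vals.count("goed") >= 4:
--         return student
--     return None
--
-- def get_excellent_students(all_students):
--     return [s for s in all_students if get_excellent_student(s) is not None]
-- ===== Notes on version B (the rewrite author's own statement) =====
-- stated objective: simpler
-- what changed: B tallies the whole results list with list.count and applies the >=2 / >=4 thresholds once, replacing A's mutable counters with mid-loop early returns; the outer function becomes a single filtering comprehension.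
import Mathlib
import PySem

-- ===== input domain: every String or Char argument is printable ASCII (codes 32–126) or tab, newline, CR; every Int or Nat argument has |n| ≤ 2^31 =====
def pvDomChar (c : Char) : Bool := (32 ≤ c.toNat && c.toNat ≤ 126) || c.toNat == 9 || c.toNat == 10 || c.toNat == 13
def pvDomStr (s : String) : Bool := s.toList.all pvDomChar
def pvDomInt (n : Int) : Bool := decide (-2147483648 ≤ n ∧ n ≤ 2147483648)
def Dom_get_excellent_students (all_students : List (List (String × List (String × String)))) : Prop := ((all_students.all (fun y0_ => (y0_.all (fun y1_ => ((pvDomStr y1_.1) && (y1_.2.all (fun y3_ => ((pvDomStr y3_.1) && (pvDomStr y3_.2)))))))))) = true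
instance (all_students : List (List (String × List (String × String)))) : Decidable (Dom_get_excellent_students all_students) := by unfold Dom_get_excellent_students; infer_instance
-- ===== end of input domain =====

-- B replaces A's mutable counters with early returns by one full tally (list.count) plus a
-- single threshold test, and the outer loop by a filtering comprehension; objective: simpler.

-- ===== PORT A =====
-- A's for-loop over the result values with the two counters and its mid-loop 'return student'.
def pvLoopA (student : List (String × List (String × String))) :
    List String → Int → Int → Option (List (String × List (String × String)))
  | [], _, _ => none
  | r :: rest, u, g =>
    if r = "onvoldoende" then pvLoopA student rest u g
    else if r = "uitmuntend" then
      (if u + 1 = 2 then some student else pvLoopA student rest (u + 1) g)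
    else if r = "goed" then
      (if g + 1 = 4 then some student else pvLoopA student rest u (g + 1))
    else pvLoopA student rest u g

-- student["resultaten"] raises KeyError when the key is absent (none here; excluded by Pre_).
def pvHelperA (student : List (String × List (String × String))) :
    Option (List (String × List (String × String))) :=
  match (PySem.Dict.ofList student).get? "resultaten" with
  | none => none
  | some res => pvLoopA student (PySem.Dict.ofList res).values 0 0

def get_excellent_students (all_students : List (List (String × List (String × String)))) : List (List (String × List (String × String))) :=
  all_students.foldl (fun acc student =>
    match pvHelperA student with
    | some e => acc ++ [e]
    | none => acc) []

-- ===== PORT B =====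
def pvHelperB (student : List (String × List (String × String))) :
    Option (List (String × List (String × String))) :=
  match (PySem.Dict.ofList student).get? "resultaten" with
  | none => none
  | some res =>
    let vals := (PySem.Dict.ofList res).values
    if 2 ≤ vals.count "uitmuntend" ∨ 4 ≤ vals.count "goed" then some student else none

def get_excellent_students_alt (all_students : List (List (String × List (String × String)))) : List (List (String × List (String × String))) :=
  all_students.filter (fun s => (pvHelperB s).isSome)

-- ===== PRECONDITION & SPEC =====
-- Pre_ excludes exactly the inputs where A raises KeyError: a student dict without the key
-- "resultaten" (B raises there too).
def Pre_get_excellent_students (all_students : List (List (String × List (String × String)))) : Prop :=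
  ∀ s ∈ all_students, ((PySem.Dict.ofList s).get? "resultaten").isSome = true
instance (all_students : List (List (String × List (String × String)))) : Decidable (Pre_get_excellent_students all_students) := by unfold Pre_get_excellent_students; infer_instance

def pvWitness_get_excellent_students : (List (List (String × List (String × String)))) :=
  [[("resultaten", [("wiskunde", "uitmuntend"), ("taal", "goed")])]]

def Spec_get_excellent_students (all_students : List (List (String × List (String × String)))) (out : List (List (String × List (String × String)))) : Prop := out = get_excellent_students_alt all_students
instance (all_students : List (List (String × List (String × String)))) (out : List (List (String × List (String × String)))) : Decidable (Spec_get_excellent_students all_students out) := by unfold Spec_get_excellent_students; infer_instance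

-- ===== CLAIM (what is proved, stated in full; the proofs are below) =====
def Claim_equal_get_excellent_students : Prop := ∀ (all_students : List (List (String × List (String × String)))), Dom_get_excellent_students all_students → Pre_get_excellent_students all_students → Spec_get_excellent_students all_students (get_excellent_students all_students)

-- ===== LEMMAS AND PROOFS =====

-- Invariant of A's counter loop: with u ≤ 1 and g ≤ 3 still to spare, it returns the student
-- iff the remaining values push a tally over its threshold.
theorem pvLoopA_eq (student : List (String × List (String × String))) (vs : List String)
    (u g : Int) (hu : u ≤ 1) (hg : g ≤ 3) :
    pvLoopA student vs u g =
      (if 2 ≤ u + (vs.count "uitmuntend" : Int) ∨ 4 ≤ g + (vs.count "goed" : Int)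
        then some student else none) := by
  induction vs generalizing u g with
  | nil => simp [pvLoopA]; omega
  | cons r rest ih =>
    by_cases h1 : r = "onvoldoende"
    · rw [pvLoopA, if_pos h1, ih u g hu hg]
      subst h1
      simp
    · by_cases h2 : r = "uitmuntend"
      · rw [pvLoopA, if_neg h1, if_pos h2]
        subst h2
        simp only [List.count_cons_self, List.count_cons_of_ne (by decide : ("uitmuntend":String) ≠ "goed")]
        by_cases h3 : u + 1 = 2
        · rw [if_pos h3, if_pos (by push_cast; omega)]
        · rw [if_neg h3, ih (u + 1) g (by omega) hg]
          congr 1; rw [eq_iff_iff]; push_cast; omega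
      · by_cases h4 : r = "goed"
        · rw [pvLoopA, if_neg h1, if_neg h2, if_pos h4]
          subst h4
          simp only [List.count_cons_self, List.count_cons_of_ne (by decide : ("goed":String) ≠ "uitmuntend")]
          by_cases h5 : g + 1 = 4
          · rw [if_pos h5, if_pos (by push_cast; omega)]
          · rw [if_neg h5, ih u (g + 1) hu (by omega)]
            congr 1; rw [eq_iff_iff]; push_cast; omega
        · rw [pvLoopA, if_neg h1, if_neg h2, if_neg h4, ih u g hu hg]
          simp [h2, h4]

-- The two helpers agree on every student (both map a missing "resultaten" key to none).
theorem pvHelper_eq (s : List (String × List (String × String))) :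
    pvHelperA s = pvHelperB s := by
  unfold pvHelperA pvHelperB
  cases h : (PySem.Dict.ofList s).get? "resultaten" with
  | none => rfl
  | some res =>
    simp only []
    rw [pvLoopA_eq s _ 0 0 (by omega) (by omega)]
    congr 1
    rw [eq_iff_iff]
    omega

theorem pv_fold_eq (l : List (List (String × List (String × String))))
    (acc : List (List (String × List (String × String)))) :
    l.foldl (fun acc student =>
      match pvHelperA student with
      | some e => acc ++ [e]
      | none => acc) acc = acc ++ l.filter (fun s => (pvHelperB s).isSome) := by
  induction l generalizing acc with
  | nil => simp
  | cons s rest ih =>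
    rw [List.foldl_cons, List.filter_cons]
    rw [pvHelper_eq s]
    cases hB : pvHelperB s with
    | none => simp [ih]
    | some e =>
      have he : e = s := by
        unfold pvHelperB at hB
        cases h : (PySem.Dict.ofList s).get? "resultaten" with
        | none => rw [h] at hB; simp at hB
        | some res =>
          rw [h] at hB; simp only [] at hB
          split at hB
          · simpa using hB.symm
          · simp at hB
      subst he
      simp [ih]

-- ===== VERDICT (by name: the statement is the Claim_ definition above) =====
theorem get_excellent_students_spec : Claim_equal_get_excellent_students := by
  intro all_students _ _
  unfold Spec_get_excellent_students get_excellent_students get_excellent_students_alt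
  rw [pv_fold_eq all_students []]
  simp
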